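-- pv_equiv track=rewrite | github.com/Zer0pa/ZPE-XR | code/source/zpe_xr/codec.py | apply_entries
-- ===== SOURCE A (Python) =====
-- from typing import List, Optional, Sequence, Tuple
--
-- QVec3 = Tuple[int, int, int]
--
-- DeltaEntry = Tuple[int, int, int, int]
--
-- class PacketDecodeError(ValueError):
--     """Raised when packet parsing fails validation."""
--
-- def apply_entries(base_q: Sequence[QVec3], entries: Sequence[DeltaEntry]) -> List[QVec3]:
--     updated = list(base_q)
--     for joint_index, dx, dy, dz in entries:
--         if joint_index < 0 or joint_index >= len(updated):
--             raise PacketDecodeError("Joint index out of range")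
--         x, y, z = updated[joint_index]
--         updated[joint_index] = (x + dx, y + dy, z + dz)
--     return updated
-- ===== SOURCE B (Python) =====
-- from typing import List, Sequence, Tuple
--
-- QVec3 = Tuple[int, int, int]
-- DeltaEntry = Tuple[int, int, int, int]
--
-- class PacketDecodeError(ValueError):
--     """Raised when packet parsing fails validation."""
--
-- def apply_entries(base_q: Sequence[QVec3], entries: Sequence[DeltaEntry]) -> List[QVec3]:
--     # Pass 1: aggregate per-joint deltas (bounds-checking every entry).
--     n = len(base_q)
--     deltas = {}
--     for joint_index, dx, dy, dz in entries:
--         if joint_index < 0 or joint_index >= n: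
--             raise PacketDecodeError("Joint index out of range")
--         ax, ay, az = deltas.get(joint_index, (0, 0, 0))
--         deltas[joint_index] = (ax + dx, ay + dy, az + dz)
--     # Pass 2: add the aggregated delta to each base joint.
--     result = []
--     for i, (x, y, z) in enumerate(base_q):
--         dx, dy, dz = deltas.get(i, (0, 0, 0))
--         result.append((x + dx, y + dy, z + dz))
--     return result
-- ===== Notes on version B (the rewrite author's own statement) =====
-- stated objective: alternative
-- what changed: Replaces the sequential read-modify-write on a mutable copy of base_q by two passes: one pass aggregating per-joint delta sums into a dict (with the same bounds check per entry), then one pass over base_q adding each joint's aggregated delta; correctness rests on associativity/commutativity of addition.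
import Mathlib
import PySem

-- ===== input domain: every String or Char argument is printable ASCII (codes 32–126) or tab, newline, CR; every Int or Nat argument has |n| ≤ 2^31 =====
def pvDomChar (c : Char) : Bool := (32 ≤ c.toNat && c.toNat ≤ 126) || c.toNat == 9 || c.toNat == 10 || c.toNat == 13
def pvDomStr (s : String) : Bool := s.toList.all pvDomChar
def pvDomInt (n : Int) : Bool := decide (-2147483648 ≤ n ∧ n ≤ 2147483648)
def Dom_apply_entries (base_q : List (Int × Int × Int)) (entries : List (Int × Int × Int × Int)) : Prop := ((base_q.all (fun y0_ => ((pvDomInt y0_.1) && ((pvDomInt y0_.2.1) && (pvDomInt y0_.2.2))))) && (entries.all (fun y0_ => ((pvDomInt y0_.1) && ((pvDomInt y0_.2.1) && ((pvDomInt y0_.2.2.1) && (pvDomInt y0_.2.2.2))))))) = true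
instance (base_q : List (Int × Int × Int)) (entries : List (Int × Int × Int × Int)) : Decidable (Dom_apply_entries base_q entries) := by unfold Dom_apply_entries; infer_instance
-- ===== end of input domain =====

-- B replaces A's sequential read-modify-write on a copied list by two passes: aggregate
-- per-joint delta sums into a dict, then add each joint's aggregated delta to base_q
-- (alternative decomposition, same asymptotic cost).


-- ===== PORT A =====
-- one loop iteration of A: bounds-check, read updated[joint_index], write back the sum
-- (on the raising branch, excluded by Pre_, the port leaves the list unchanged)
def pvStepA (upd : List (Int × Int × Int)) (e : Int × Int × Int × Int) : List (Int × Int × Int) :=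
  match e with
  | (j, dx, dy, dz) =>
    if j < 0 ∨ (upd.length : Int) ≤ j then upd
    else
      match upd[j.toNat]? with
      | some (x, y, z) => upd.set j.toNat (x + dx, y + dy, z + dz)
      | none => upd

def apply_entries (base_q : List (Int × Int × Int)) (entries : List (Int × Int × Int × Int)) : List (Int × Int × Int) :=
  entries.foldl pvStepA base_q

-- ===== PORT B =====
-- pass 1: aggregate per-joint deltas into a dict (raising branch, excluded by Pre_, leaves it unchanged)
def pvAccB (n : Int) (d : PySem.Dict Int (Int × Int × Int)) (e : Int × Int × Int × Int) : PySem.Dict Int (Int × Int × Int) :=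
  match e with
  | (j, dx, dy, dz) =>
    if j < 0 ∨ n ≤ j then d
    else
      match d.getD j (0, 0, 0) with
      | (ax, ay, az) => d.insert j (ax + dx, ay + dy, az + dz)

def apply_entries_alt (base_q : List (Int × Int × Int)) (entries : List (Int × Int × Int × Int)) : List (Int × Int × Int) :=
  let n : Int := base_q.length
  let deltas := entries.foldl (pvAccB n) PySem.Dict.empty
  -- pass 2: for i, (x, y, z) in enumerate(base_q): add deltas.get(i, (0,0,0))
  (PySem.List.enumerate base_q).map (fun p =>
    match p with
    | (i, (x, y, z)) =>
      match deltas.getD i (0, 0, 0) with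
      | (dx, dy, dz) => (x + dx, y + dy, z + dz))

-- ===== PRECONDITION & SPEC =====
-- Pre_ excludes exactly the inputs where A raises PacketDecodeError: some entry's
-- joint_index is negative or ≥ len(base_q) (B raises the same error there).
def Pre_apply_entries (base_q : List (Int × Int × Int)) (entries : List (Int × Int × Int × Int)) : Prop :=
  ∀ e ∈ entries, 0 ≤ e.1 ∧ e.1 < (base_q.length : Int)
instance (base_q : List (Int × Int × Int)) (entries : List (Int × Int × Int × Int)) : Decidable (Pre_apply_entries base_q entries) := by unfold Pre_apply_entries; infer_instance

def pvWitness_apply_entries : (List (Int × Int × Int)) × (List (Int × Int × Int × Int)) :=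
  ([(1, 2, 3), (4, 5, 6)], [(0, 1, 1, 1), (1, -2, 0, 3), (0, 10, 0, 0)])

def Spec_apply_entries (base_q : List (Int × Int × Int)) (entries : List (Int × Int × Int × Int)) (out : List (Int × Int × Int)) : Prop := out = apply_entries_alt base_q entries
instance (base_q : List (Int × Int × Int)) (entries : List (Int × Int × Int × Int)) (out : List (Int × Int × Int)) : Decidable (Spec_apply_entries base_q entries out) := by unfold Spec_apply_entries; infer_instance

-- ===== CLAIM (what is proved, stated in full; the proofs are below) =====
def Claim_equal_apply_entries : Prop := ∀ (base_q : List (Int × Int × Int)) (entries : List (Int × Int × Int × Int)), Dom_apply_entries base_q entries → Pre_apply_entries base_q entries → Spec_apply_entries base_q entries (apply_entries base_q entries)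

-- ===== LEMMAS AND PROOFS =====

-- componentwise triple addition
def pvAdd (a b : Int × Int × Int) : Int × Int × Int := (a.1 + b.1, a.2.1 + b.2.1, a.2.2 + b.2.2)

-- the total delta that `entries` contribute to joint i
def pvSum : List (Int × Int × Int × Int) → Int → Int × Int × Int
  | [], _ => (0, 0, 0)
  | (j, dx, dy, dz) :: rest, i =>
      if j = i then pvAdd (dx, dy, dz) (pvSum rest i) else pvSum rest i

theorem pvAdd_zero (a : Int × Int × Int) : pvAdd a (0, 0, 0) = a := by
  cases a with | mk x yz => cases yz; simp [pvAdd]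

theorem pvAdd_assoc (a b c : Int × Int × Int) :
    pvAdd (pvAdd a b) c = pvAdd a (pvAdd b c) := by
  simp [pvAdd]; omega

-- A computes the canonical form: base + aggregated delta at each position
theorem apply_entries_canon (entries : List (Int × Int × Int × Int))
    (base : List (Int × Int × Int))
    (h : ∀ e ∈ entries, 0 ≤ e.1 ∧ e.1 < (base.length : Int)) :
    apply_entries base entries =
      (PySem.List.enumerate base).map (fun p => pvAdd p.2 (pvSum entries p.1)) := by
  induction entries generalizing base with
  | nil =>
      apply List.ext_getElem
      · simp [apply_entries, PySem.List.length_enumerate]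
      · intro i h1 h2
        simp [apply_entries, pvSum, pvAdd_zero]
  | cons e rest ih =>
      obtain ⟨j, dx, dy, dz⟩ := e
      have hj := h (j, dx, dy, dz) (List.mem_cons_self ..)
      simp only at hj
      have hjn : j.toNat < base.length := by omega
      have hstep : apply_entries base ((j, dx, dy, dz) :: rest) =
          apply_entries (base.set j.toNat (pvAdd base[j.toNat] (dx, dy, dz))) rest := by
        simp only [apply_entries, List.foldl_cons, pvStepA]
        rw [if_neg (by omega)]
        rw [List.getElem?_eq_getElem hjn]
        obtain ⟨x, y, z⟩ := base[j.toNat]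
        rfl
      rw [hstep, ih _ (by
        intro e he
        have := h e (List.mem_cons_of_mem _ he)
        simpa using this)]
      apply List.ext_getElem
      · simp [PySem.List.length_enumerate]
      · intro i h1 h2
        simp only [List.getElem_map, PySem.List.getElem_enumerate] at *
        rw [List.getElem_set]
        by_cases hij : j.toNat = i
        · subst hij
          rw [if_pos rfl]
          have : j = (j.toNat : Int) := by omega
          simp [pvSum, ← this, pvAdd]
          omega
        · rw [if_neg hij]
          have hne : j ≠ (i : Int) := by omega
          simp [pvSum, hne]

-- the aggregation dict's lookup is the aggregated delta sum
theorem accB_getD (entries : List (Int × Int × Int × Int)) (n : Int)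
    (d : PySem.Dict Int (Int × Int × Int)) (i : Int)
    (h : ∀ e ∈ entries, 0 ≤ e.1 ∧ e.1 < n) :
    (entries.foldl (pvAccB n) d).getD i (0, 0, 0) =
      pvAdd (d.getD i (0, 0, 0)) (pvSum entries i) := by
  induction entries generalizing d with
  | nil => simp [pvSum, pvAdd_zero]
  | cons e rest ih =>
      obtain ⟨j, dx, dy, dz⟩ := e
      have hj := h (j, dx, dy, dz) (List.mem_cons_self ..)
      simp only at hj
      have hstep : (((j, dx, dy, dz) :: rest).foldl (pvAccB n) d) =
          rest.foldl (pvAccB n)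
            (d.insert j (pvAdd (d.getD j (0, 0, 0)) (dx, dy, dz))) := by
        simp only [List.foldl_cons, pvAccB]
        rw [if_neg (by omega)]
        obtain ⟨ax, ay, az⟩ := d.getD j (0, 0, 0)
        rfl
      rw [hstep, ih _ (fun e he => h e (List.mem_cons_of_mem _ he))]
      rw [PySem.Dict.getD_insert]
      by_cases hij : i = j
      · subst hij
        simp [pvSum, pvAdd_assoc]
      · have : j ≠ i := fun hh => hij hh.symm
        simp [pvSum, this, hij]

-- B computes the same canonical form
theorem apply_entries_alt_canon (base : List (Int × Int × Int))
    (entries : List (Int × Int × Int × Int))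
    (h : ∀ e ∈ entries, 0 ≤ e.1 ∧ e.1 < (base.length : Int)) :
    apply_entries_alt base entries =
      (PySem.List.enumerate base).map (fun p => pvAdd p.2 (pvSum entries p.1)) := by
  unfold apply_entries_alt
  apply List.map_congr_left
  intro p hp
  obtain ⟨i, xyz⟩ := p
  obtain ⟨x, y, z⟩ := xyz
  simp only
  rw [accB_getD _ _ _ _ h]
  simp only [PySem.Dict.getD_empty]
  obtain ⟨sx, sy, sz⟩ := pvSum entries i
  simp [pvAdd]

-- ===== VERDICT (by name: the statement is the Claim_ definition above) =====
theorem apply_entries_spec : Claim_equal_apply_entries := by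
  intro base entries _ hpre
  unfold Spec_apply_entries
  rw [apply_entries_canon entries base hpre, apply_entries_alt_canon base entries hpre]
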